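-- pv_equiv track=rewrite | github.com/sbernsen/blender_assets | python/obj2grid.py | get_priority_key
-- ===== SOURCE A (Python) =====
-- priority = {
--     "ice": 0,
--     "air": 1,
--     "base": 2,
--     "heterogeneity": 3,  # all heterogeneity* share this priority
-- }
--
-- def get_priority_key(name: str) -> int:
--     lower = name.lower()
--     if "heterogeneity" in lower:
--         return priority["heterogeneity"]
--     for key in ("base", "air", "ice"):
--         if key in lower:
--             return priority[key]
--     return -1  # lowest
-- ===== SOURCE B (Python) =====
-- # B: single positional scan of the lowered name; at each index, check which key
-- # starts there and keep the best priority seen (no substring membership tests).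
-- _KEYS = (("heterogeneity", 3), ("base", 2), ("air", 1), ("ice", 0))
--
-- def get_priority_key(name: str) -> int:
--     lower = name.lower()
--     best = -1
--     for i in range(len(lower)):
--         for key, prio in _KEYS:
--             if prio > best and lower.startswith(key, i):
--                 best = prio
--     return best
-- ===== Notes on version B (the rewrite author's own statement) =====
-- stated objective: alternative
-- what changed: Replaces the heterogeneity special case plus ordered substring-membership tests on the lowered name by a single positional scan that checks which key starts at each index and keeps the maximum priority in an accumulator.
import Mathlib
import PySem

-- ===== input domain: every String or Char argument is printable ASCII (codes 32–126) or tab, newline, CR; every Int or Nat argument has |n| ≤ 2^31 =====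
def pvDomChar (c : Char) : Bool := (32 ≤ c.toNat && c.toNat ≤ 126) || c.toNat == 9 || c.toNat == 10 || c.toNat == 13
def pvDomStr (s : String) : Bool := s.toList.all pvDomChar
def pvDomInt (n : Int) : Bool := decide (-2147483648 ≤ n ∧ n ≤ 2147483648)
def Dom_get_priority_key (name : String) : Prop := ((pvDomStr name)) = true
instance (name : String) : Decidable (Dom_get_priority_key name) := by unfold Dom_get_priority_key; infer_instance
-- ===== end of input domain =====

-- B replaces A's heterogeneity special case + ordered substring-membership loop by one
-- positional scan of the lowered name keeping the best priority (objective: alternative).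

-- ===== PORT A =====
def pvPriority : PySem.Dict String Int :=
  PySem.Dict.ofList [("ice", 0), ("air", 1), ("base", 2), ("heterogeneity", 3)]

-- the for-loop over ("base", "air", "ice"), first match returns priority[key]
def pvLoopA (lower : String) : List String → Int
  | [] => -1
  | k :: rest => if PySem.Str.isIn k lower then (pvPriority.get? k).getD (-1) else pvLoopA lower rest

def get_priority_key (name : String) : Int :=
  let lower := PySem.Str.lower name
  if PySem.Str.isIn "heterogeneity" lower then (pvPriority.get? "heterogeneity").getD (-1)
  else pvLoopA lower ["base", "air", "ice"]

-- ===== PORT B =====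
def pvKeysB : List (List Char × Int) :=
  [("heterogeneity".toList, 3), ("base".toList, 2), ("air".toList, 1), ("ice".toList, 0)]

-- inner `for key, prio in _KEYS` loop; `lower.startswith(key, i)` is exactly
-- "key is a prefix of lower[i:]" (i ranges over 0..len-1 here), ported as isPrefixOf/drop
def pvInnerB (s : List Char) (i : Nat) (best : Int) : Int :=
  pvKeysB.foldl (fun b p => if decide (p.2 > b) && p.1.isPrefixOf (s.drop i) then p.2 else b) best

def get_priority_key_alt (name : String) : Int :=
  let lower := (PySem.Str.lower name).toList
  (List.range lower.length).foldl (fun best i => pvInnerB lower i best) (-1)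

-- ===== PRECONDITION & SPEC =====
def Spec_get_priority_key (name : String) (out : Int) : Prop := out = get_priority_key_alt name
instance (name : String) (out : Int) : Decidable (Spec_get_priority_key name out) := by unfold Spec_get_priority_key; infer_instance

-- ===== CLAIM =====
def Claim_equal_get_priority_key : Prop := ∀ (name : String), Dom_get_priority_key name → Spec_get_priority_key name (get_priority_key name)

-- ===== LEMMAS AND PROOFS =====

-- does key k start at index i of s?
def pvStarts (s k : List Char) (i : Nat) : Bool := k.isPrefixOf (s.drop i)

-- priority of the best key starting at index i (keys checked in descending priority)
def pvMatch (s : List Char) (i : Nat) : Int :=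
  if pvStarts s "heterogeneity".toList i then 3
  else if pvStarts s "base".toList i then 2
  else if pvStarts s "air".toList i then 1
  else if pvStarts s "ice".toList i then 0
  else -1

theorem pvInnerB_eq_max (s : List Char) (i : Nat) (best : Int) (hb : -1 ≤ best) :
    pvInnerB s i best = max best (pvMatch s i) := by
  unfold pvInnerB pvKeysB pvMatch pvStarts
  simp only [List.foldl, Bool.and_eq_true, decide_eq_true_eq]
  split_ifs <;> simp_all <;> omega

-- has key k an occurrence starting before index n?
def pvAny (s k : List Char) (n : Nat) : Bool := (List.range n).any (fun i => pvStarts s k i)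

def pvCanon (s : List Char) (n : Nat) : Int :=
  if pvAny s "heterogeneity".toList n then 3
  else if pvAny s "base".toList n then 2
  else if pvAny s "air".toList n then 1
  else if pvAny s "ice".toList n then 0
  else -1

theorem pvAny_succ (s k : List Char) (n : Nat) :
    pvAny s k (n + 1) = (pvAny s k n || pvStarts s k n) := by
  simp [pvAny, List.range_succ]

theorem pvFold_eq_canon (s : List Char) (n : Nat) :
    (List.range n).foldl (fun best i => pvInnerB s i best) (-1) = pvCanon s n := by
  induction n with
  | zero => simp [pvCanon, pvAny]
  | succ m ih =>
    have hge : -1 ≤ pvCanon s m := by unfold pvCanon; split_ifs <;> omega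
    rw [List.range_succ, List.foldl_append, ih]
    simp only [List.foldl, pvInnerB_eq_max _ _ _ hge]
    unfold pvCanon pvMatch
    rw [pvAny_succ, pvAny_succ, pvAny_succ, pvAny_succ]
    cases ha3 : pvAny s "heterogeneity".toList m <;>
    cases ha2 : pvAny s "base".toList m <;>
    cases ha1 : pvAny s "air".toList m <;>
    cases ha0 : pvAny s "ice".toList m <;>
    cases hs3 : pvStarts s "heterogeneity".toList m <;>
    cases hs2 : pvStarts s "base".toList m <;>
    cases hs1 : pvStarts s "air".toList m <;>
    cases hs0 : pvStarts s "ice".toList m <;>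
    simp

-- positional-scan existence over range (length) equals Python's `k in s`, for nonempty k
theorem pvAny_eq_isIn (s k : List Char) (hk : k ≠ []) :
    pvAny s k s.length = PySem.Chars.isIn k s := by
  cases h : PySem.Chars.isIn k s with
  | true =>
    obtain ⟨j, hj⟩ := (PySem.Chars.exists_prefix_drop_iff_isIn (sub := k) (s := s)).2 h
    have hjlt : j < s.length := by
      by_contra hge
      have : s.drop j = [] := List.drop_eq_nil_of_le (by omega)
      rw [this] at hj
      exact hk (List.prefix_nil.mp hj)
    simp only [pvAny, List.any_eq_true]
    exact ⟨j, by simpa using hjlt, by simpa [pvStarts, List.isPrefixOf_iff_prefix] using hj⟩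
  | false =>
    simp only [pvAny, List.any_eq_false]
    intro i hi
    simp only [pvStarts, List.isPrefixOf_iff_prefix]
    intro hpre
    have : PySem.Chars.isIn k s = true :=
      (PySem.Chars.exists_prefix_drop_iff_isIn (sub := k) (s := s)).1 ⟨i, hpre⟩
    simp [h] at this

-- ===== VERDICT =====
theorem get_priority_key_spec : Claim_equal_get_priority_key := by
  intro name _
  unfold Spec_get_priority_key get_priority_key get_priority_key_alt
  rw [pvFold_eq_canon]
  unfold pvCanon
  rw [pvAny_eq_isIn _ _ (by decide), pvAny_eq_isIn _ _ (by decide),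
      pvAny_eq_isIn _ _ (by decide), pvAny_eq_isIn _ _ (by decide)]
  have e3 : PySem.Chars.isIn "heterogeneity".toList (PySem.Str.lower name).toList
      = PySem.Str.isIn "heterogeneity" (PySem.Str.lower name) := rfl
  have e2 : PySem.Chars.isIn "base".toList (PySem.Str.lower name).toList
      = PySem.Str.isIn "base" (PySem.Str.lower name) := rfl
  have e1 : PySem.Chars.isIn "air".toList (PySem.Str.lower name).toList
      = PySem.Str.isIn "air" (PySem.Str.lower name) := rfl
  have e0 : PySem.Chars.isIn "ice".toList (PySem.Str.lower name).toList
      = PySem.Str.isIn "ice" (PySem.Str.lower name) := rfl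
  rw [e3, e2, e1, e0]
  cases h3 : PySem.Str.isIn "heterogeneity" (PySem.Str.lower name) <;>
  cases h2 : PySem.Str.isIn "base" (PySem.Str.lower name) <;>
  cases h1 : PySem.Str.isIn "air" (PySem.Str.lower name) <;>
  cases h0 : PySem.Str.isIn "ice" (PySem.Str.lower name) <;>
  simp_all [pvLoopA] <;> rfl
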